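-- pv_equiv track=rewrite | github.com/anushkumarv/leetcode | daily challenge/jul24.py | patternPoints
-- ===== SOURCE A (Python) =====
-- def patternPoints(s, pattern, points):
--     count = 0
--     stk = []
--     for c in s:
--         stk.append(c)
--         if len(stk) >= 2 and stk[-1] == pattern[-1] and stk[-2] == pattern[-2]:
--             stk.pop()
--             stk.pop()
--             count += points
--     return ''.join(stk), count
-- ===== SOURCE B (Python) =====
-- def patternPoints(s, pattern, points):
--     # fixpoint of "delete the leftmost occurrence of the effective 2-char pattern"
--     p = pattern[-2] + pattern[-1]
--     count = 0
--     while True: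
--         i = s.find(p)
--         if i == -1:
--             return s, count
--         s = s[:i] + s[i + 2:]
--         count += points
-- ===== Notes on version B (the rewrite author's own statement) =====
-- stated objective: alternative
-- what changed: Replaces A's one-pass explicit stack with a fixpoint loop that repeatedly finds and deletes the leftmost occurrence of the effective 2-char pattern (pattern[-2:]) and scores per deletion; confluence of the deletion rewriting guarantees the same final string and count.
-- outside the precondition, e.g. on patternPoints('ab', 'x', 5): A returns ('ab', 0), B raises IndexError; on patternPoints('', '', 3): A returns ('', 0), B raises IndexError
import Mathlib
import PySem

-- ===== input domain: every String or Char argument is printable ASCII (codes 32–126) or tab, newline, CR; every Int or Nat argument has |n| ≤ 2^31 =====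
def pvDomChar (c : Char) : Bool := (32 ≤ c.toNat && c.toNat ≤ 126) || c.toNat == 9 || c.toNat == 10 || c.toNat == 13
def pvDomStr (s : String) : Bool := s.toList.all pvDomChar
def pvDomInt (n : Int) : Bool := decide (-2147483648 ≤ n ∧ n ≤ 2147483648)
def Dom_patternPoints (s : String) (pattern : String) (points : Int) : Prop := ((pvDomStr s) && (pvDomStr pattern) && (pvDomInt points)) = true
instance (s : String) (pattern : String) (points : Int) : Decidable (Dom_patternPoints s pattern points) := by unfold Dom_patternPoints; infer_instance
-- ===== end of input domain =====

-- B replaces A's one-pass stack by a fixpoint loop that repeatedly deletes the leftmost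
-- occurrence of the effective 2-char pattern (alternative decomposition, not faster).

-- ===== PORT A =====
-- one iteration of A's for-loop: append c, pop twice and score when the top two match pattern[-2:], lazily indexed
def pvAStep (pattern : String) (points : Int) (st : List Char × Int) (c : Char) : List Char × Int :=
  let stk := st.1 ++ [c]
  if 2 ≤ stk.length ∧ PySem.List.pyGet? stk (-1) = PySem.Str.pyGet? pattern (-1) ∧
      PySem.List.pyGet? stk (-2) = PySem.Str.pyGet? pattern (-2) then
    (stk.dropLast.dropLast, st.2 + points)   -- stk.pop(); stk.pop(); count += points
  else (stk, st.2)

def patternPoints (s : String) (pattern : String) (points : Int) : String × Int :=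
  let r := s.toList.foldl (pvAStep pattern points) ([], 0)
  (String.ofList r.1, r.2)   -- ''.join(stk), count

-- ===== PORT B =====
-- B's while-loop: find the leftmost occurrence of [p1, p2], delete it via the two slices, repeat
def pvAltLoop (p1 p2 : Char) (points : Int) : Nat → List Char → Int → List Char × Int
  | 0, cs, count => (cs, count)   -- fuel exhausted: never reached when fuel ≥ cs.length (each pass deletes 2 chars)
  | fuel + 1, cs, count =>
    let i := PySem.Chars.find cs [p1, p2]
    if i = -1 then (cs, count)
    else pvAltLoop p1 p2 points fuel
          (PySem.List.slice cs none (some i) ++ PySem.List.slice cs (some (i + 2)) none)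
          (count + points)

def patternPoints_alt (s : String) (pattern : String) (points : Int) : String × Int :=
  match PySem.Str.pyGet? pattern (-2), PySem.Str.pyGet? pattern (-1) with
  | some p1, some p2 =>
      let r := pvAltLoop p1 p2 points s.toList.length s.toList 0
      (String.ofList r.1, r.2)
  | _, _ => (s, 0)   -- pattern[-2] or pattern[-1] raises IndexError in Python: outside Pre_

-- ===== PRECONDITION & SPEC =====
-- Pre_ excludes patterns shorter than 2 characters: there A may return (s, 0) or raise a lazy
-- IndexError depending on s's content — an accident of short-circuit evaluation — and B's
-- eager pattern[-2] raises IndexError.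
def Pre_patternPoints (s : String) (pattern : String) (points : Int) : Prop :=
  2 ≤ pattern.toList.length

instance (s : String) (pattern : String) (points : Int) : Decidable (Pre_patternPoints s pattern points) := by unfold Pre_patternPoints; infer_instance

def pvWitness_patternPoints : String × String × Int := ("aabccb", "bc", 3)

def Spec_patternPoints (s : String) (pattern : String) (points : Int) (out : String × Int) : Prop := out = patternPoints_alt s pattern points
instance (s : String) (pattern : String) (points : Int) (out : String × Int) : Decidable (Spec_patternPoints s pattern points out) := by unfold Spec_patternPoints; infer_instance

-- ===== CLAIM (what is proved, stated in full; the proofs are below) =====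
def Claim_equal_patternPoints : Prop := ∀ (s : String) (pattern : String) (points : Int), Dom_patternPoints s pattern points → Pre_patternPoints s pattern points → Spec_patternPoints s pattern points (patternPoints s pattern points)

-- ===== LEMMAS AND PROOFS =====

-- A's stack step, recast with the stack reversed (top of stack = head of list)
def pvStep (p1 p2 : Char) (points : Int) (st : List Char × Int) (c : Char) : List Char × Int :=
  if c = p2 ∧ st.1.head? = some p1 then (st.1.tail, st.2 + points) else (c :: st.1, st.2)

-- while [p1, p2] does not occur across (reversed stack r) ++ l, the fold just pushes l
theorem pvStep_no_occ (p1 p2 : Char) (points : Int) :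
    ∀ (l r : List Char) (n : Int), ¬ [p1, p2] <:+: (r.reverse ++ l) →
      l.foldl (pvStep p1 p2 points) (r, n) = (l.reverse ++ r, n) := by
  intro l
  induction l with
  | nil => intro r n _; simp
  | cons c cs ih =>
    intro r n hno
    by_cases hc : c = p2 ∧ r.head? = some p1
    · exfalso
      obtain ⟨hc2, hc1⟩ := hc
      cases r with
      | nil => simp at hc1
      | cons a t =>
        simp at hc1
        apply hno
        subst hc1 hc2
        exact ⟨t.reverse, cs, by simp⟩
    · have hstep : pvStep p1 p2 points (r, n) c = (c :: r, n) := by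
        simp [pvStep, hc]
      rw [List.foldl_cons, hstep, ih (c :: r) n (by simpa using hno)]
      simp

-- consuming the pattern pair p1, p2 pops/pushes back to the same stack and scores once,
-- provided the stack top two are not p2, p1
theorem pvStep_pair (p1 p2 : Char) (points : Int) (r : List Char) (n : Int) (y : List Char)
    (h : ¬ [p2, p1] <+: r) :
    (p1 :: p2 :: y).foldl (pvStep p1 p2 points) (r, n)
      = y.foldl (pvStep p1 p2 points) (r, n + points) := by
  have hstep : pvStep p1 p2 points (pvStep p1 p2 points (r, n) p1) p2 = (r, n + points) := by
    by_cases h1 : p1 = p2 ∧ r.head? = some p1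
    · obtain ⟨h12, hh⟩ := h1
      cases r with
      | nil => simp at hh
      | cons a t =>
        have ha : a = p1 := by simpa using hh
        have ht : ¬ (p2 = p2 ∧ t.head? = some p1) := by
          rintro ⟨-, hth⟩
          cases t with
          | nil => simp at hth
          | cons b u =>
            have hb : b = p1 := by simpa using hth
            exact h ⟨u, by simp [ha, hb, ← h12]⟩
        have htp : t.head? ≠ some p1 := fun hth => ht ⟨rfl, hth⟩
        have e1 : pvStep p1 p2 points (a :: t, n) p1 = (t, n + points) := by
          simp [pvStep, h12, ha]
        have e2 : pvStep p1 p2 points (t, n + points) p2 = (p2 :: t, n + points) := by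
          simp [pvStep, htp]
        rw [e1, e2, ha, h12]
    · have e1 : pvStep p1 p2 points (r, n) p1 = (p1 :: r, n) := by
        simp [pvStep, h1]
      have e2 : pvStep p1 p2 points (p1 :: r, n) p2 = (r, n + points) := by
        simp [pvStep]
      rw [e1, e2]
  simp only [List.foldl_cons, hstep]

-- A-side: one port step equals one reversed-stack step
theorem pvAStep_eq_pvStep (pattern : String) (points : Int) (p1 p2 : Char)
    (h1 : PySem.Str.pyGet? pattern (-1) = some p2)
    (h2 : PySem.Str.pyGet? pattern (-2) = some p1)
    (stk : List Char) (n : Int) (c : Char) :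
    pvAStep pattern points (stk, n) c
      = (((pvStep p1 p2 points (stk.reverse, n) c).1.reverse),
          (pvStep p1 p2 points (stk.reverse, n) c).2) := by
  cases stk with
  | nil =>
    have hcond : ¬ (2 ≤ (([] : List Char) ++ [c]).length ∧
        PySem.List.pyGet? (([] : List Char) ++ [c]) (-1) = PySem.Str.pyGet? pattern (-1) ∧
        PySem.List.pyGet? (([] : List Char) ++ [c]) (-2) = PySem.Str.pyGet? pattern (-2)) := by
      simp
    have hc2 : ¬ (c = p2 ∧ (([] : List Char).reverse.head? = some p1)) := by simp
    simp only [pvAStep, pvStep]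
    rw [if_neg hcond, if_neg hc2]
    simp
  | cons a t =>
    have hget1 : PySem.List.pyGet? ((a :: t) ++ [c]) (-1) = some c := by
      rw [PySem.List.pyGet?_neg_one, List.getLast?_concat]
    have hget2 : PySem.List.pyGet? ((a :: t) ++ [c]) (-2) = (a :: t).getLast? := by
      rw [PySem.List.pyGet?_neg_ofNat _ 2 (by omega) (by simp)]
      have hl : ((a :: t) ++ [c]).length - 2 = (a :: t).length - 1 := by simp
      rw [hl, List.getElem?_append_left (by simp), List.getLast?_eq_getElem?]
    by_cases hc : c = p2 ∧ (a :: t).getLast? = some p1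
    · have hcond : (2 ≤ ((a :: t) ++ [c]).length ∧
          PySem.List.pyGet? ((a :: t) ++ [c]) (-1) = PySem.Str.pyGet? pattern (-1) ∧
          PySem.List.pyGet? ((a :: t) ++ [c]) (-2) = PySem.Str.pyGet? pattern (-2)) := by
        rw [h1, h2, hget1, hget2]
        exact ⟨by simp, by simp [hc.1], by simp [hc.2]⟩
      have hc' : c = p2 ∧ ((a :: t).reverse.head? = some p1) := by
        rw [List.head?_reverse]; exact hc
      simp only [pvAStep, pvStep]
      rw [if_pos hcond, if_pos hc']
      refine Prod.ext ?_ rfl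
      simp only [List.dropLast_concat, List.tail_reverse, List.reverse_reverse]
    · have hcond : ¬ (2 ≤ ((a :: t) ++ [c]).length ∧
          PySem.List.pyGet? ((a :: t) ++ [c]) (-1) = PySem.Str.pyGet? pattern (-1) ∧
          PySem.List.pyGet? ((a :: t) ++ [c]) (-2) = PySem.Str.pyGet? pattern (-2)) := by
        rw [h1, h2, hget1, hget2]
        rintro ⟨-, hx, hy⟩
        exact hc ⟨by simpa using hx, by simpa using hy⟩
      have hc' : ¬ (c = p2 ∧ ((a :: t).reverse.head? = some p1)) := by
        rw [List.head?_reverse]; exact hc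
      simp only [pvAStep, pvStep]
      rw [if_neg hcond, if_neg hc']
      simp

-- A-side: the whole fold equals the reversed-stack fold
theorem pvAFold_eq (pattern : String) (points : Int) (p1 p2 : Char)
    (h1 : PySem.Str.pyGet? pattern (-1) = some p2)
    (h2 : PySem.Str.pyGet? pattern (-2) = some p1) :
    ∀ (l stk : List Char) (n : Int),
      l.foldl (pvAStep pattern points) (stk, n)
        = (((l.foldl (pvStep p1 p2 points) (stk.reverse, n)).1.reverse),
            (l.foldl (pvStep p1 p2 points) (stk.reverse, n)).2) := by
  intro l
  induction l with
  | nil => intro stk n; simp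
  | cons c cs ih =>
    intro stk n
    rw [List.foldl_cons, pvAStep_eq_pvStep pattern points p1 p2 h1 h2 stk n c, List.foldl_cons]
    rcases hmk : pvStep p1 p2 points (stk.reverse, n) c with ⟨r', n'⟩
    rw [ih r'.reverse n']
    simp

-- no occurrence of [p1, p2] starts strictly before position k in cs
theorem pvTake_no_prefix (p1 p2 : Char) (cs : List Char) (k : Nat)
    (hmin : ∀ i < k, ¬ [p1, p2] <+: cs.drop i) (j : Nat) (hj : j + 2 ≤ k) :
    ¬ [p1, p2] <+: (cs.take k).drop j := by
  intro hp
  exact hmin j (by omega) (hp.trans (by rw [List.drop_take]; exact List.take_prefix _ _))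

-- B-side: the fuelled while-loop computes exactly the reversed-stack fold (string reversed back)
theorem pvAltLoop_eq (p1 p2 : Char) (points : Int) :
    ∀ (fuel : Nat) (cs : List Char), cs.length ≤ fuel → ∀ (n : Int),
      pvAltLoop p1 p2 points fuel cs n
        = (((cs.foldl (pvStep p1 p2 points) ([], n)).1.reverse),
            (cs.foldl (pvStep p1 p2 points) ([], n)).2) := by
  intro fuel
  induction fuel with
  | zero =>
    intro cs hcs n
    have hnil : cs = [] := List.eq_nil_of_length_eq_zero (by omega)
    subst hnil
    simp [pvAltLoop]
  | succ fuel ih =>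
  intro cs hcs n
  by_cases hfind : PySem.Chars.find cs [p1, p2] = -1
  · rw [pvAltLoop, if_pos hfind]
    have hno : ¬ [p1, p2] <:+: cs := (PySem.Chars.find_eq_neg_one_iff cs [p1, p2]).mp hfind
    rw [pvStep_no_occ p1 p2 points cs [] n (by simpa using hno)]
    simp
  · have h0 : (0:Int) ≤ PySem.Chars.find cs [p1, p2] := by
      have := PySem.Chars.neg_one_le_find cs [p1, p2]; omega
    obtain ⟨hpre, hmin⟩ := PySem.Chars.find_spec h0
    set k := (PySem.Chars.find cs [p1, p2]).toNat with hk
    have hkl : k + 2 ≤ cs.length := by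
      have := hpre.length_le; simp at this; omega
    obtain ⟨y0, hy0⟩ := hpre
    have hy : y0 = cs.drop (k + 2) := by
      have hdd := congrArg (List.drop 2) hy0
      simp [List.drop_drop] at hdd
      simpa [Nat.add_comm] using hdd
    subst hy
    have hdecomp : cs = cs.take k ++ (p1 :: p2 :: cs.drop (k + 2)) := by
      conv_lhs => rw [← List.take_append_drop k cs]
      rw [← hy0]; simp
    -- (a) no occurrence of the pair inside the prefix before k
    have hnox : ¬ [p1, p2] <:+: cs.take k := by
      intro hinf
      have hex := (PySem.Chars.exists_prefix_drop_iff_isIn [p1, p2] (cs.take k)).mpr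
        ((PySem.Chars.isIn_iff_infix _ _).mpr hinf)
      obtain ⟨j, hj⟩ := hex
      have hjb : j + 2 ≤ k := by
        have := hj.length_le; simp at this; omega
      exact pvTake_no_prefix p1 p2 cs k hmin j hjb hj
    -- (b) the prefix before k does not end with p1, p2
    have hnosfx : ¬ [p2, p1] <+: (cs.take k).reverse := by
      intro hp
      have hsfx : [p1, p2] <:+ cs.take k := by
        have := hp.reverse
        simpa using this
      obtain ⟨w, hw⟩ := hsfx
      have hklen : (cs.take k).length = k := by simp; omega
      have hwk : w.length + 2 = k := by
        have hlw := congrArg List.length hw; simp [hklen] at hlw; omega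
      have hpk : [p1, p2] <+: (cs.take k).drop (k - 2) := by
        rw [← hw, List.drop_append_of_le_length (by omega),
          List.drop_eq_nil_of_le (by omega)]
        simp
      exact pvTake_no_prefix p1 p2 cs k hmin (k - 2) (by omega) hpk
    -- both folds step to the reduced list
    have hfold : cs.foldl (pvStep p1 p2 points) ([], n)
        = (cs.take k ++ cs.drop (k + 2)).foldl (pvStep p1 p2 points) ([], n + points) := by
      conv_lhs => rw [hdecomp]
      rw [List.foldl_append,
        pvStep_no_occ p1 p2 points (cs.take k) [] n (by simpa using hnox),
        List.append_nil,
        pvStep_pair p1 p2 points (cs.take k).reverse n (cs.drop (k + 2)) hnosfx,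
        List.foldl_append,
        pvStep_no_occ p1 p2 points (cs.take k) [] (n + points) (by simpa using hnox),
        List.append_nil]
    rw [pvAltLoop, if_neg hfind,
      PySem.List.slice_to cs h0, PySem.List.slice_from cs (by omega)]
    have htn : (PySem.Chars.find cs [p1, p2] + 2).toNat = k + 2 := by omega
    rw [htn, ih (cs.take k ++ cs.drop (k + 2)) (by simp; omega) (n + points), hfold]

-- the two ports agree whenever the pattern has at least two characters
theorem pvMain (s pattern : String) (points : Int)
    (hpre : 2 ≤ pattern.toList.length) :
    patternPoints s pattern points = patternPoints_alt s pattern points := by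
  have h1 : PySem.Str.pyGet? pattern (-1)
      = some (pattern.toList[pattern.toList.length - 1]) := by
    rw [PySem.Str.pyGet?_eq, PySem.Chars.pyGet?_eq_listPyGet?, PySem.List.pyGet?_neg_one,
      List.getLast?_eq_getElem?, List.getElem?_eq_getElem (by omega)]
  have h2 : PySem.Str.pyGet? pattern (-2)
      = some (pattern.toList[pattern.toList.length - 2]) := by
    rw [PySem.Str.pyGet?_eq, PySem.Chars.pyGet?_eq_listPyGet?,
      PySem.List.pyGet?_neg_ofNat _ 2 (by omega) (by omega),
      List.getElem?_eq_getElem (by omega)]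
  set p2 := pattern.toList[pattern.toList.length - 1]
  set p1 := pattern.toList[pattern.toList.length - 2]
  unfold patternPoints patternPoints_alt
  rw [h1, h2]
  simp only
  rw [pvAFold_eq pattern points p1 p2 h1 h2 s.toList [] 0,
    pvAltLoop_eq p1 p2 points s.toList.length s.toList le_rfl 0]
  simp

-- ===== VERDICT (by name: the statement is the Claim_ definition above) =====
theorem patternPoints_spec : Claim_equal_patternPoints := by
  intro s pattern points _ hpre
  unfold Spec_patternPoints
  exact pvMain s pattern points hpre
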